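-- pv_equiv track=rewrite | github.com/haolunc/ARC-RL | reference_solutions/solutions/3618c87e.py | transform
-- ===== SOURCE A (Python) =====
-- def transform(grid):
--
--     out = [row[:] for row in grid]
--
--     h = len(grid)
--     if h == 0:
--         return out
--     w = len(grid[0])
--
--     for r in range(h - 2):
--         for c in range(w):
--             if grid[r][c] == 1 and grid[r + 1][c] == 5:
--                 out[r][c] = 0
--                 out[r + 2][c] = 1
--
--     return out
-- ===== SOURCE B (Python) =====
-- def transform(grid):
--     h = len(grid)
--     w = len(grid[0]) if h else 0
--     res = []
--     for r, row in enumerate(grid):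
--         new = []
--         for c, v in enumerate(row):
--             if c < w and r + 2 < h and v == 1 and grid[r + 1][c] == 5:
--                 new.append(0)
--             elif c < w and r >= 2 and grid[r - 2][c] == 1 and grid[r - 1][c] == 5:
--                 new.append(1)
--             else:
--                 new.append(v)
--         res.append(new)
--     return res
-- ===== Notes on version B (the rewrite author's own statement) =====
-- stated objective: alternative
-- what changed: B builds the output grid cell-by-cell as a pure gather (each cell computes its final value from the original grid: lifted marker -> 0, receiver two rows below -> 1, else unchanged) instead of A's scatter that writes into a mutable copy.
import Mathlib
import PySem

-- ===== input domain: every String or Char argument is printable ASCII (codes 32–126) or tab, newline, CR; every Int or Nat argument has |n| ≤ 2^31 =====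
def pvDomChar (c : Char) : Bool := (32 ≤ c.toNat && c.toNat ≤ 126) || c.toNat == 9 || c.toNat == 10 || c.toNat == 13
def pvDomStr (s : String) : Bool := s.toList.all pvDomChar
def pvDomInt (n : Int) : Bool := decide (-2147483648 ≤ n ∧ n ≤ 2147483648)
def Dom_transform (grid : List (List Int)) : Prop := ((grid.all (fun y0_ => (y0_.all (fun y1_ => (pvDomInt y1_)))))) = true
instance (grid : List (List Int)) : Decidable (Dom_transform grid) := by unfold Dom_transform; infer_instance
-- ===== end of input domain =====

-- B is a structurally different re-implementation (pure per-cell gather instead of A's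
-- scatter into a mutable copy); A mutates nothing in place; Pre_ excludes exactly the
-- inputs on which Python A raises IndexError (ragged grids whose traversed cells run
-- past a row's end).

-- ===== PORT A =====
-- grid[i][j] as A reads it (indices produced by range(), hence Nat; in-range inside Pre_)
def pvG (grid : List (List Int)) (i j : Nat) : Int := (grid.getD i []).getD j 0

-- out[i][j] = v  (list assignment; in-range inside Pre_)
def pvSet2 (m : List (List Int)) (i j : Nat) (v : Int) : List (List Int) :=
  m.modify i (fun row => row.set j v)

def transform (grid : List (List Int)) : List (List Int) :=
  let out := grid          -- out = [row[:] for row in grid]: identity on immutable lists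
  let h := grid.length
  if h = 0 then out
  else
    let w := (grid.headD []).length
    (List.range (h - 2)).foldl (fun out r =>
      (List.range w).foldl (fun out c =>
        if pvG grid r c = 1 ∧ pvG grid (r + 1) c = 5 then
          pvSet2 (pvSet2 out r c 0) (r + 2) c 1
        else out) out) out

-- ===== PORT B =====
def transform_alt (grid : List (List Int)) : List (List Int) :=
  let h := grid.length
  let w := (grid.headD []).length
  grid.mapIdx (fun r row => row.mapIdx (fun c v =>
    if c < w ∧ r + 2 < h ∧ v = 1 ∧ pvG grid (r + 1) c = 5 then 0
    else if c < w ∧ 2 ≤ r ∧ pvG grid (r - 2) c = 1 ∧ pvG grid (r - 1) c = 5 then 1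
    else v))

-- ===== PRECONDITION & SPEC =====
-- Pre_ excludes exactly the inputs on which Python A raises IndexError: some row reached
-- by the scan (rows 0..h-3 fully; rows r+1 / r+2 behind a true guard) is shorter than
-- the column index being read or written. On every other input A returns.
def Pre_transform (grid : List (List Int)) : Prop :=
  ∀ r < grid.length, r + 2 < grid.length →
    ∀ c < (grid.headD []).length,
      c < (grid.getD r []).length ∧
      (pvG grid r c = 1 →
        c < (grid.getD (r + 1) []).length ∧
        (pvG grid (r + 1) c = 5 → c < (grid.getD (r + 2) []).length))
instance (grid : List (List Int)) : Decidable (Pre_transform grid) := by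
  unfold Pre_transform; exact Nat.decidableBallLT _ _

def pvWitness_transform : List (List Int) := [[1], [5], [0]]

def Spec_transform (grid : List (List Int)) (out : List (List Int)) : Prop := out = transform_alt grid
instance (grid : List (List Int)) (out : List (List Int)) : Decidable (Spec_transform grid out) := by unfold Spec_transform; infer_instance

-- ===== CLAIM (what is proved, stated in full; the proofs are below) =====
def Claim_equal_transform : Prop := ∀ (grid : List (List Int)), Dom_transform grid → Pre_transform grid → Spec_transform grid (transform grid)

-- ===== LEMMAS AND PROOFS =====

-- abbreviations used only by the proofs
abbrev pvCond (grid : List (List Int)) (r c : Nat) : Prop :=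
  pvG grid r c = 1 ∧ pvG grid (r + 1) c = 5

def pvInner (grid : List (List Int)) (w : Nat) (out : List (List Int)) (r : Nat) : List (List Int) :=
  (List.range w).foldl (fun out c =>
    if pvG grid r c = 1 ∧ pvG grid (r + 1) c = 5 then
      pvSet2 (pvSet2 out r c 0) (r + 2) c 1
    else out) out

def pvOuter (grid : List (List Int)) (w k : Nat) : List (List Int) :=
  (List.range k).foldl (pvInner grid w) grid

theorem pvLen_set2 (m : List (List Int)) (i j : Nat) (v : Int) :
    (pvSet2 m i j v).length = m.length := by
  simp [pvSet2]

theorem pvRow_set2 (m : List (List Int)) (i j : Nat) (v : Int) (i' : Nat) :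
    (pvSet2 m i j v).getD i' [] = if i' = i then (m.getD i' []).set j v else m.getD i' [] := by
  unfold pvSet2
  rw [List.getD_eq_getElem?_getD, List.getElem?_modify]
  by_cases hi : i' = i
  · subst hi
    cases h : m[i']? with
    | none => simp [List.getD_eq_getElem?_getD, h]
    | some row => simp [List.getD_eq_getElem?_getD, h]
  · have hne : i ≠ i' := fun h => hi h.symm
    cases h : m[i']? with
    | none => simp [List.getD_eq_getElem?_getD, h, hi]
    | some row => simp [List.getD_eq_getElem?_getD, h, hi, hne]

theorem pvSetRow (row : List Int) (j : Nat) (v : Int) (j' : Nat) :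
    ((row.set j v).getD j' 0) = if j' = j ∧ j < row.length then v else row.getD j' 0 := by
  rw [List.getD_eq_getElem?_getD, List.getElem?_set]
  by_cases hj : j = j'
  · subst hj
    by_cases hl : j < row.length
    · simp [hl]
    · have hnone : row[j]? = none := List.getElem?_eq_none (by omega)
      simp [hl, List.getD_eq_getElem?_getD]
  · have : ¬ (j' = j ∧ j < row.length) := fun h => hj h.1.symm
    simp [hj, this, List.getD_eq_getElem?_getD]

theorem pvRowLen_set2 (m : List (List Int)) (i j : Nat) (v : Int) (i' : Nat) :
    ((pvSet2 m i j v).getD i' []).length = (m.getD i' []).length := by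
  rw [pvRow_set2]; split <;> simp

theorem pvG_set2 (m : List (List Int)) (i j : Nat) (v : Int) (i' j' : Nat) :
    pvG (pvSet2 m i j v) i' j' =
      if i' = i ∧ j' = j ∧ j < (m.getD i []).length then v else pvG m i' j' := by
  unfold pvG
  rw [pvRow_set2]
  by_cases hi : i' = i
  · subst hi
    rw [if_pos rfl, pvSetRow]
    by_cases h : j' = j ∧ j < (m.getD i' []).length
    · rw [if_pos h, if_pos ⟨rfl, h⟩]
    · rw [if_neg h, if_neg (by rintro ⟨-, h2, h3⟩; exact h ⟨h2, h3⟩)]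
  · rw [if_neg hi, if_neg (by rintro ⟨h1, -⟩; exact hi h1)]

-- characterization of one inner pass (row r, columns < w)
theorem pvInner_val (grid : List (List Int)) (out : List (List Int)) (r w : Nat)
    (hlen : ∀ i, ((out.getD i []).length) = (grid.getD i []).length) (i j : Nat) :
    pvG (pvInner grid w out r) i j =
      if i = r ∧ j < w ∧ j < (grid.getD r []).length ∧ pvCond grid r j then 0
      else if i = r + 2 ∧ j < w ∧ j < (grid.getD (r + 2) []).length ∧ pvCond grid r j then 1
      else pvG out i j := by
  induction w generalizing out with
  | zero => simp [pvInner]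
  | succ w ih =>
    unfold pvInner
    rw [List.range_succ, List.foldl_append, List.foldl_cons, List.foldl_nil]
    have hInner : (List.range w).foldl (fun out c =>
        if pvG grid r c = 1 ∧ pvG grid (r + 1) c = 5 then
          pvSet2 (pvSet2 out r c 0) (r + 2) c 1
        else out) out = pvInner grid w out r := rfl
    rw [hInner]
    have hlen' : ∀ i, ((pvInner grid w out r).getD i []).length = (grid.getD i []).length := by
      intro i
      clear ih hInner
      induction w generalizing out with
      | zero => simpa [pvInner] using hlen i
      | succ w ih2 =>
        unfold pvInner
        rw [List.range_succ, List.foldl_append, List.foldl_cons, List.foldl_nil]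
        have : (List.range w).foldl (fun out c =>
            if pvG grid r c = 1 ∧ pvG grid (r + 1) c = 5 then
              pvSet2 (pvSet2 out r c 0) (r + 2) c 1
            else out) out = pvInner grid w out r := rfl
        rw [this]
        split
        · rw [pvRowLen_set2, pvRowLen_set2]; exact ih2 out hlen
        · exact ih2 out hlen
    split
    · next hc =>
      -- condition holds at column w
      rw [pvG_set2, pvG_set2]
      rw [pvRowLen_set2, hlen' r, hlen' (r + 2)]
      by_cases h1 : i = r + 2 ∧ j = w ∧ w < (grid.getD (r + 2) []).length
      · obtain ⟨hi, hj, hw⟩ := h1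
        subst hi; subst hj
        rw [if_pos ⟨rfl, rfl, hw⟩]
        rw [if_neg (show ¬(r + 2 = r ∧ j < j + 1 ∧ j < (grid.getD r []).length ∧ pvCond grid r j) from by rintro ⟨h, -⟩; omega)]
        rw [if_pos (show r + 2 = r + 2 ∧ j < j + 1 ∧ j < (grid.getD (r + 2) []).length ∧ pvCond grid r j from ⟨rfl, by omega, hw, hc⟩)]
      · rw [if_neg h1]
        by_cases h2 : i = r ∧ j = w ∧ w < (grid.getD r []).length
        · obtain ⟨hi, hj, hw⟩ := h2
          rw [if_pos ⟨hi, hj, hw⟩]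
          subst hi hj
          rw [if_pos ⟨rfl, by omega, hw, hc⟩]
        · rw [if_neg h2, ih out hlen]
          -- now both sides: conditions with bound w vs w+1, at (i,j) ≠ the new writes
          by_cases hm : i = r ∧ j < w ∧ j < (grid.getD r []).length ∧ pvCond grid r j
          · rw [if_pos hm, if_pos ⟨hm.1, by omega, hm.2.2⟩]
          · rw [if_neg hm]
            by_cases hm' : i = r ∧ j < w + 1 ∧ j < (grid.getD r []).length ∧ pvCond grid r j
            · exfalso
              obtain ⟨hi, hj, hl, hcc⟩ := hm'
              have hjw : j = w := by
                by_contra hne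
                exact hm ⟨hi, by omega, hl, hcc⟩
              exact h2 ⟨hi, hjw, hjw ▸ hl⟩
            · rw [if_neg hm']
              by_cases hr : i = r + 2 ∧ j < w ∧ j < (grid.getD (r + 2) []).length ∧ pvCond grid r j
              · rw [if_pos hr, if_pos ⟨hr.1, by omega, hr.2.2⟩]
              · rw [if_neg hr]
                by_cases hr' : i = r + 2 ∧ j < w + 1 ∧ j < (grid.getD (r + 2) []).length ∧ pvCond grid r j
                · exfalso
                  obtain ⟨hi, hj, hl, hcc⟩ := hr'
                  have hjw : j = w := by
                    by_contra hne
                    exact hr ⟨hi, by omega, hl, hcc⟩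
                  exact h1 ⟨hi, hjw, hjw ▸ hl⟩
                · rw [if_neg hr']
    · next hc =>
      rw [ih out hlen]
      have hcq : ¬ pvCond grid r w := hc
      by_cases hm : i = r ∧ j < w ∧ j < (grid.getD r []).length ∧ pvCond grid r j
      · rw [if_pos hm, if_pos ⟨hm.1, by omega, hm.2.2⟩]
      · rw [if_neg hm]
        by_cases hm' : i = r ∧ j < w + 1 ∧ j < (grid.getD r []).length ∧ pvCond grid r j
        · exfalso
          obtain ⟨hi, hj, hl, hcc⟩ := hm'
          have : j = w := by by_contra hne; exact hm ⟨hi, by omega, hl, hcc⟩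
          exact hcq (this ▸ hcc)
        · rw [if_neg hm']
          by_cases hr : i = r + 2 ∧ j < w ∧ j < (grid.getD (r + 2) []).length ∧ pvCond grid r j
          · rw [if_pos hr, if_pos ⟨hr.1, by omega, hr.2.2⟩]
          · rw [if_neg hr]
            by_cases hr' : i = r + 2 ∧ j < w + 1 ∧ j < (grid.getD (r + 2) []).length ∧ pvCond grid r j
            · exfalso
              obtain ⟨hi, hj, hl, hcc⟩ := hr'
              have : j = w := by by_contra hne; exact hr ⟨hi, by omega, hl, hcc⟩
              exact hcq (this ▸ hcc)
            · rw [if_neg hr']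

theorem pvInner_rowlen (grid out : List (List Int)) (r w : Nat) (i : Nat) :
    ((pvInner grid w out r).getD i []).length = ((out.getD i []).length) := by
  induction w generalizing out with
  | zero => simp [pvInner]
  | succ w ih =>
    unfold pvInner
    rw [List.range_succ, List.foldl_append, List.foldl_cons, List.foldl_nil]
    have : (List.range w).foldl (fun out c =>
        if pvG grid r c = 1 ∧ pvG grid (r + 1) c = 5 then
          pvSet2 (pvSet2 out r c 0) (r + 2) c 1
        else out) out = pvInner grid w out r := rfl
    rw [this]
    split
    · rw [pvRowLen_set2, pvRowLen_set2]; exact ih out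
    · exact ih out

theorem pvInner_len (grid out : List (List Int)) (r w : Nat) :
    (pvInner grid w out r).length = out.length := by
  induction w generalizing out with
  | zero => simp [pvInner]
  | succ w ih =>
    unfold pvInner
    rw [List.range_succ, List.foldl_append, List.foldl_cons, List.foldl_nil]
    have : (List.range w).foldl (fun out c =>
        if pvG grid r c = 1 ∧ pvG grid (r + 1) c = 5 then
          pvSet2 (pvSet2 out r c 0) (r + 2) c 1
        else out) out = pvInner grid w out r := rfl
    rw [this]
    split
    · rw [pvLen_set2, pvLen_set2]; exact ih out
    · exact ih out

theorem pvOuter_len (grid : List (List Int)) (w k : Nat) :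
    (pvOuter grid w k).length = grid.length := by
  induction k with
  | zero => simp [pvOuter]
  | succ k ih =>
    unfold pvOuter
    rw [List.range_succ, List.foldl_append, List.foldl_cons, List.foldl_nil]
    have : (List.range k).foldl (pvInner grid w) grid = pvOuter grid w k := rfl
    rw [this, pvInner_len, ih]

theorem pvOuter_rowlen (grid : List (List Int)) (w k : Nat) (i : Nat) :
    ((pvOuter grid w k).getD i []).length = (grid.getD i []).length := by
  induction k with
  | zero => simp [pvOuter]
  | succ k ih =>
    unfold pvOuter
    rw [List.range_succ, List.foldl_append, List.foldl_cons, List.foldl_nil]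
    have : (List.range k).foldl (pvInner grid w) grid = pvOuter grid w k := rfl
    rw [this, pvInner_rowlen, ih]

-- characterization of the whole scatter loop
theorem pvOuter_val (grid : List (List Int)) (w k i j : Nat) :
    pvG (pvOuter grid w k) i j =
      if i < k ∧ j < w ∧ j < (grid.getD i []).length ∧ pvCond grid i j then 0
      else if 2 ≤ i ∧ i - 2 < k ∧ j < w ∧ j < (grid.getD i []).length ∧ pvCond grid (i - 2) j then 1
      else pvG grid i j := by
  induction k with
  | zero => simp [pvOuter]
  | succ k ih =>
    unfold pvOuter
    rw [List.range_succ, List.foldl_append, List.foldl_cons, List.foldl_nil]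
    have hfold : (List.range k).foldl (pvInner grid w) grid = pvOuter grid w k := rfl
    rw [hfold]
    rw [pvInner_val grid (pvOuter grid w k) k w (fun i => pvOuter_rowlen grid w k i) i j]
    by_cases h1 : i = k ∧ j < w ∧ j < (grid.getD k []).length ∧ pvCond grid k j
    · obtain ⟨hi, hj, hl, hc⟩ := h1
      subst hi
      rw [if_pos ⟨rfl, hj, hl, hc⟩, if_pos ⟨by omega, hj, hl, hc⟩]
    · rw [if_neg h1]
      by_cases h2 : i = k + 2 ∧ j < w ∧ j < (grid.getD (k + 2) []).length ∧ pvCond grid k j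
      · obtain ⟨hi, hj, hl, hc⟩ := h2
        subst hi
        rw [if_pos ⟨rfl, hj, hl, hc⟩]
        rw [if_neg (by rintro ⟨h, -⟩; omega)]
        rw [if_pos ⟨by omega, by omega, hj, hl, by
          have hkk : k + 2 - 2 = k := by omega
          rw [hkk]; exact hc⟩]
      · rw [if_neg h2, ih]
        by_cases hm : i < k ∧ j < w ∧ j < (grid.getD i []).length ∧ pvCond grid i j
        · rw [if_pos hm, if_pos ⟨by omega, hm.2⟩]
        · rw [if_neg hm]
          by_cases hm' : i < k + 1 ∧ j < w ∧ j < (grid.getD i []).length ∧ pvCond grid i j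
          · exfalso
            obtain ⟨hik, hj, hl, hc⟩ := hm'
            have : i = k := by by_contra hne; exact hm ⟨by omega, hj, hl, hc⟩
            exact h1 ⟨this, hj, this ▸ hl, this ▸ hc⟩
          · rw [if_neg hm']
            by_cases hr : 2 ≤ i ∧ i - 2 < k ∧ j < w ∧ j < (grid.getD i []).length ∧ pvCond grid (i - 2) j
            · rw [if_pos hr, if_pos ⟨hr.1, by omega, hr.2.2⟩]
            · rw [if_neg hr]
              by_cases hr' : 2 ≤ i ∧ i - 2 < k + 1 ∧ j < w ∧ j < (grid.getD i []).length ∧ pvCond grid (i - 2) j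
              · exfalso
                obtain ⟨h2i, hik, hj, hl, hc⟩ := hr'
                have hik' : i - 2 = k := by by_contra hne; exact hr ⟨h2i, by omega, hj, hl, hc⟩
                have hieq : i = k + 2 := by omega
                exact h2 ⟨hieq, hj, hieq ▸ hl, by rw [← hik']; exact hc⟩
              · rw [if_neg hr']

theorem pvG_eq_getElem (m : List (List Int)) (i j : Nat) (hi : i < m.length)
    (hj : j < m[i].length) : pvG m i j = m[i][j] := by
  unfold pvG
  rw [List.getD_eq_getElem _ _ hi, List.getD_eq_getElem _ _ hj]

-- ===== VERDICT (by name: the statement is the Claim_ definition above) =====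
theorem alt_eq (grid : List (List Int)) :
    transform_alt grid = grid.mapIdx (fun r row => row.mapIdx (fun c v =>
      if c < (grid.headD []).length ∧ r + 2 < grid.length ∧ v = 1 ∧ pvG grid (r + 1) c = 5 then 0
      else if c < (grid.headD []).length ∧ 2 ≤ r ∧ pvG grid (r - 2) c = 1 ∧ pvG grid (r - 1) c = 5 then 1
      else v)) := rfl

theorem transform_spec : Claim_equal_transform := by
  intro grid _ _
  unfold Spec_transform
  rw [alt_eq]
  unfold transform
  by_cases h0 : grid.length = 0
  · rw [if_pos h0]
    have hnil : grid = [] := List.eq_nil_of_length_eq_zero h0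
    subst hnil; rfl
  · rw [if_neg h0]
    have hA : (List.range (grid.length - 2)).foldl
        (fun out r => (List.range (grid.headD []).length).foldl (fun out c =>
          if pvG grid r c = 1 ∧ pvG grid (r + 1) c = 5 then
            pvSet2 (pvSet2 out r c 0) (r + 2) c 1
          else out) out) grid
        = pvOuter grid (grid.headD []).length (grid.length - 2) := rfl
    rw [hA]
    apply List.ext_getElem
    · rw [pvOuter_len, List.length_mapIdx]
    · intro i hi hi'
      have hig : i < grid.length := by rw [pvOuter_len] at hi; exact hi
      apply List.ext_getElem
      · have h1 : (pvOuter grid (grid.headD []).length (grid.length - 2))[i]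
            = (pvOuter grid (grid.headD []).length (grid.length - 2)).getD i [] := by
          rw [List.getD_eq_getElem _ _ hi]
        rw [h1, pvOuter_rowlen, List.getD_eq_getElem _ _ hig, List.getElem_mapIdx,
          List.length_mapIdx]
      · intro j hj hj'
        have hjg : j < grid[i].length := by
          simp only [List.getElem_mapIdx, List.length_mapIdx] at hj'
          exact hj'
        have hlhs : (pvOuter grid (grid.headD []).length (grid.length - 2))[i][j]
            = pvG (pvOuter grid (grid.headD []).length (grid.length - 2)) i j := by
          rw [pvG_eq_getElem _ _ _ hi hj]
        rw [hlhs, pvOuter_val]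
        simp only [List.getElem_mapIdx]
        have hv : grid[i][j] = pvG grid i j := (pvG_eq_getElem grid i j hig hjg).symm
        have hl : j < (grid.getD i []).length := by
          rw [List.getD_eq_getElem _ _ hig]; exact hjg
        rw [hv]
        set w := (grid.headD []).length with hw
        set k := grid.length - 2 with hk
        by_cases hjw : j < w
        · by_cases hmk : i < k ∧ pvG grid i j = 1 ∧ pvG grid (i + 1) j = 5
          · rw [if_pos (show i < k ∧ j < w ∧ j < (grid.getD i []).length ∧ pvCond grid i j from
              ⟨hmk.1, hjw, hl, hmk.2.1, hmk.2.2⟩)]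
            rw [if_pos (show j < w ∧ i + 2 < grid.length ∧ pvG grid i j = 1 ∧ pvG grid (i + 1) j = 5 from
              ⟨hjw, by omega, hmk.2.1, hmk.2.2⟩)]
          · rw [if_neg (show ¬(i < k ∧ j < w ∧ j < (grid.getD i []).length ∧ pvCond grid i j) from by
              rintro ⟨a, b, c, d, e⟩; exact hmk ⟨a, d, e⟩)]
            rw [if_neg (show ¬(j < w ∧ i + 2 < grid.length ∧ pvG grid i j = 1 ∧ pvG grid (i + 1) j = 5) from by
              rintro ⟨a, b, c, d⟩; exact hmk ⟨by omega, c, d⟩)]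
            by_cases hrc : 2 ≤ i ∧ pvG grid (i - 2) j = 1 ∧ pvG grid (i - 1) j = 5
            · rw [if_pos (show 2 ≤ i ∧ i - 2 < k ∧ j < w ∧ j < (grid.getD i []).length ∧ pvCond grid (i - 2) j from
                ⟨hrc.1, by omega, hjw, hl, hrc.2.1, by
                  rw [show i - 2 + 1 = i - 1 from by omega]; exact hrc.2.2⟩)]
              rw [if_pos (show j < w ∧ 2 ≤ i ∧ pvG grid (i - 2) j = 1 ∧ pvG grid (i - 1) j = 5 from
                ⟨hjw, hrc.1, hrc.2.1, hrc.2.2⟩)]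
            · rw [if_neg (show ¬(2 ≤ i ∧ i - 2 < k ∧ j < w ∧ j < (grid.getD i []).length ∧ pvCond grid (i - 2) j) from by
                rintro ⟨a, b, c, d, e1, e2⟩
                exact hrc ⟨a, e1, by rw [show i - 1 = i - 2 + 1 from by omega]; exact e2⟩)]
              rw [if_neg (show ¬(j < w ∧ 2 ≤ i ∧ pvG grid (i - 2) j = 1 ∧ pvG grid (i - 1) j = 5) from by
                rintro ⟨a, b, c, d⟩; exact hrc ⟨b, c, d⟩)]
        · rw [if_neg (show ¬(i < k ∧ j < w ∧ j < (grid.getD i []).length ∧ pvCond grid i j) from by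
              rintro ⟨-, b, -⟩; exact hjw b),
            if_neg (show ¬(2 ≤ i ∧ i - 2 < k ∧ j < w ∧ j < (grid.getD i []).length ∧ pvCond grid (i - 2) j) from by
              rintro ⟨-, -, c, -⟩; exact hjw c),
            if_neg (show ¬(j < w ∧ i + 2 < grid.length ∧ pvG grid i j = 1 ∧ pvG grid (i + 1) j = 5) from by
              rintro ⟨a, -⟩; exact hjw a),
            if_neg (show ¬(j < w ∧ 2 ≤ i ∧ pvG grid (i - 2) j = 1 ∧ pvG grid (i - 1) j = 5) from by
              rintro ⟨a, -⟩; exact hjw a)]
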